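-- pv_equiv track=rewrite | github.com/eagledot/hachi | images/fuzzy_search/fuzzy_search.py | first_character_comparison
-- ===== SOURCE A (Python) =====
-- def first_character_comparison(original_query:str, data:str) -> int:
--
--         original_chars = {}
--
--         DELETE_WORDS = ["a", "an", "the", "and", "in", "of", "this"] # TODO: create a better list..
--
--         for d in original_query.strip().split(" "):
--             if len(d) == 0 or d in DELETE_WORDS:
--                 continue
--
--             if d[0] not in original_chars:
--                 original_chars[d[0]] = 1
--             else:
--                 original_chars[d[0]] += 1
--
--         data_chars = {}
--         for d in data.strip().split(" "):
--             if len(d) == 0 or d in DELETE_WORDS: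
--                 continue
--             if d[0] not in data_chars:
--                 data_chars[d[0]] = 1
--             else:
--                 data_chars[d[0]] += 1
--
--         common_keys = set(original_chars.keys()).intersection(set(data_chars.keys()))
--         score = 0
--         for k in common_keys:
--             score +=  min(original_chars[k], data_chars[k])
--         return score
-- ===== SOURCE B (Python) =====
-- def first_character_comparison(original_query: str, data: str) -> int:
--     DELETE_WORDS = ["a", "an", "the", "and", "in", "of", "this"]
--
--     # one frequency dict of first characters over the query's kept words
--     counts = {}
--     for w in original_query.strip().split(" "):
--         if len(w) == 0 or w in DELETE_WORDS:
--             continue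
--         counts[w[0]] = counts.get(w[0], 0) + 1
--
--     # single consuming pass over data's words: match and decrement
--     score = 0
--     for w in data.strip().split(" "):
--         if len(w) == 0 or w in DELETE_WORDS:
--             continue
--         c = w[0]
--         if counts.get(c, 0) > 0:
--             score += 1
--             counts[c] -= 1
--     return score
-- ===== Notes on version B (the rewrite author's own statement) =====
-- stated objective: alternative
-- what changed: B builds only the query-side first-character frequency dict and then makes a single consuming pass over data's words (decrementing the counter on each match) instead of A's second frequency dict plus set-of-keys intersection plus per-key min sum.
import Mathlib
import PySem

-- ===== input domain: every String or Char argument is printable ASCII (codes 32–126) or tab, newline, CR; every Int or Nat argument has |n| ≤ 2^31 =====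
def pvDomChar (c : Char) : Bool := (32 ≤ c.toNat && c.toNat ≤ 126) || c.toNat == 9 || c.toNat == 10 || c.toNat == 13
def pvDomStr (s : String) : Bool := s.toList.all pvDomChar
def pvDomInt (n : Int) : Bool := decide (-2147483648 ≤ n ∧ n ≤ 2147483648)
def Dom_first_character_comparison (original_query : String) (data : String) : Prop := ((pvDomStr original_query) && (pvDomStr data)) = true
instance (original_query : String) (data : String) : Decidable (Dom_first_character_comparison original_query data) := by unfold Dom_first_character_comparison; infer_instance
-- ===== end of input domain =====

-- B replaces A's second frequency dict + set intersection + per-key min by a single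
-- consuming pass over data's words that decrements the query-side counter (alternative decomposition).

-- shared constants of both Pythons: the stop-word list and the skip test of both loops
def pvDeleteWords : List String := ["a", "an", "the", "and", "in", "of", "this"]
def pvSkip (w : String) : Bool := PySem.Str.len w == 0 || pvDeleteWords.contains w
-- words of s.strip().split(" "); sep " " ≠ "" so split? never raises (none branch unreachable)
def pvWords (s : String) : List String := (PySem.Str.split? (PySem.Str.strip s) " ").getD []

-- ===== PORT A =====
def first_character_comparison (original_query : String) (data : String) : Int :=
  let original_chars : PySem.Dict Char Int :=
    (pvWords original_query).foldl (fun d w =>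
      if pvSkip w then d
      else
        match PySem.Str.pyGet? w 0 with  -- d[0]; some _ here since w ≠ "" past the skip test
        | none => d
        | some c => if !d.contains c then d.insert c 1 else d.insert c (d.getD c 0 + 1))
      (PySem.Dict.empty : PySem.Dict Char Int)
  let data_chars : PySem.Dict Char Int :=
    (pvWords data).foldl (fun d w =>
      if pvSkip w then d
      else
        match PySem.Str.pyGet? w 0 with
        | none => d
        | some c => if !d.contains c then d.insert c 1 else d.insert c (d.getD c 0 + 1))
      (PySem.Dict.empty : PySem.Dict Char Int)
  let common_keys : PySem.Set Char :=
    PySem.Set.inter (PySem.Set.ofList original_chars.keys) (PySem.Set.ofList data_chars.keys)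
  -- original_chars[k] / data_chars[k]: k is a key of both dicts, so the lookup never raises; getD is exact here
  common_keys.foldl (fun score k => score + min (original_chars.getD k 0) (data_chars.getD k 0)) 0

-- ===== PORT B =====
def first_character_comparison_alt (original_query : String) (data : String) : Int :=
  let counts : PySem.Dict Char Int :=
    (pvWords original_query).foldl (fun d w =>
      if pvSkip w then d
      else
        match PySem.Str.pyGet? w 0 with  -- w[0]; some _ since w ≠ "" past the skip test
        | none => d
        | some c => d.insert c (d.getD c 0 + 1))
      (PySem.Dict.empty : PySem.Dict Char Int)
  let res :=
    (pvWords data).foldl (fun (acc : Int × PySem.Dict Char Int) w =>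
      if pvSkip w then acc
      else
        match PySem.Str.pyGet? w 0 with
        | none => acc
        | some c =>
          if acc.2.getD c 0 > 0 then (acc.1 + 1, acc.2.modify c 0 (· - 1)) else acc)
      (0, counts)
  res.1

-- ===== PRECONDITION & SPEC =====
def Spec_first_character_comparison (original_query : String) (data : String) (out : Int) : Prop := out = first_character_comparison_alt original_query data
instance (original_query : String) (data : String) (out : Int) : Decidable (Spec_first_character_comparison original_query data out) := by unfold Spec_first_character_comparison; infer_instance

-- ===== CLAIM (what is proved, stated in full; the proofs are below) =====
def Claim_equal_first_character_comparison : Prop := ∀ (original_query : String) (data : String), Dom_first_character_comparison original_query data → Spec_first_character_comparison original_query data (first_character_comparison original_query data)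

-- ===== LEMMAS AND PROOFS =====

-- the list of first characters of the kept words (the multiset both programs measure)
def pvFirsts (ws : List String) : List Char :=
  ws.filterMap (fun w => if pvSkip w then none else PySem.Str.pyGet? w 0)

-- both word-loops are folds of a char-step over pvFirsts
theorem pvFoldWords {σ : Type} (g : σ → Char → σ) (f : String → Option Char) :
    ∀ (ws : List String) (st : σ),
      ws.foldl (fun st w =>
        if pvSkip w then st
        else match f w with
          | none => st
          | some c => g st c) st
      = (ws.filterMap (fun w => if pvSkip w then none else f w)).foldl g st := by
  intro ws
  induction ws with
  | nil => intro st; rfl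
  | cons w ws ih =>
    intro st
    by_cases h : pvSkip w
    · simp [h, ih]
    · cases hg : f w with
      | none => simp [h, hg, ih]
      | some c => simp [h, hg, ih]

theorem pvFirsts_eq (ws : List String) :
    ws.filterMap (fun w => if pvSkip w then none else PySem.Str.pyGet? w 0) = pvFirsts ws := rfl

theorem pvGetD_zero_of_not_contains {κ : Type} [BEq κ] (d : PySem.Dict κ Int) (c : κ)
    (h : d.contains c = false) : d.getD c 0 = 0 := by
  have := PySem.Dict.contains_eq_isSome_get? d c
  rw [h] at this
  cases hg : d.get? c with
  | none => simp [PySem.Dict.getD, hg]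
  | some v => rw [hg] at this; simp at this

theorem pvCounterB (ws : List String) :
    ws.foldl (fun d w =>
      if pvSkip w then d
      else match PySem.Str.pyGet? w 0 with
        | none => d
        | some c => d.insert c (d.getD c 0 + 1))
      (PySem.Dict.empty : PySem.Dict Char Int)
    = PySem.Dict.counter (pvFirsts ws) := by
  have h := pvFoldWords (fun (d : PySem.Dict Char Int) (c : Char) => d.insert c (d.getD c 0 + 1))
      (fun w => PySem.Str.pyGet? w 0) ws PySem.Dict.empty
  rw [pvFirsts_eq] at h
  exact h.trans (PySem.Dict.foldl_insert_getD_add_one_eq_counter (pvFirsts ws))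

-- A's counting step equals B's (insert c 1 = insert c (getD+1) when c is absent)
theorem pvCounterA (ws : List String) :
    ws.foldl (fun d w =>
      if pvSkip w then d
      else match PySem.Str.pyGet? w 0 with
        | none => d
        | some c => if !d.contains c then d.insert c 1 else d.insert c (d.getD c 0 + 1))
      (PySem.Dict.empty : PySem.Dict Char Int)
    = PySem.Dict.counter (pvFirsts ws) := by
  have hstep : ∀ (d : PySem.Dict Char Int) (w : String),
      (if pvSkip w then d
       else match PySem.Str.pyGet? w 0 with
         | none => d
         | some c => if !d.contains c then d.insert c 1 else d.insert c (d.getD c 0 + 1))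
      = (if pvSkip w then d
         else match PySem.Str.pyGet? w 0 with
           | none => d
           | some c => d.insert c (d.getD c 0 + 1)) := by
    intro d w
    by_cases h : pvSkip w
    · simp only [if_pos h]
    · simp only [if_neg h]
      cases hg : PySem.Str.pyGet? w 0 with
      | none => rfl
      | some c =>
        by_cases hc : d.contains c
        · simp [hc]
        · simp only [Bool.not_eq_true] at hc
          simp [hc, pvGetD_zero_of_not_contains d c hc]
  calc ws.foldl _ (PySem.Dict.empty : PySem.Dict Char Int)
      = ws.foldl (fun d w =>
          if pvSkip w then d
          else match PySem.Str.pyGet? w 0 with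
            | none => d
            | some c => d.insert c (d.getD c 0 + 1)) (PySem.Dict.empty : PySem.Dict Char Int) := by
        apply List.foldl_ext
        intro d w _
        exact hstep d w
    _ = PySem.Dict.counter (pvFirsts ws) := pvCounterB ws

-- the consuming pass computes the sum of per-character minima
theorem pvConsume (D : List Char) :
    ∀ (m : PySem.Dict Char Int) (s : Int), (∀ c, 0 ≤ m.getD c 0) →
      (D.foldl (fun (acc : Int × PySem.Dict Char Int) c =>
        if acc.2.getD c 0 > 0 then (acc.1 + 1, acc.2.modify c 0 (· - 1)) else acc) (s, m)).1
      = s + ∑ c ∈ D.toFinset, min (m.getD c 0) (D.count c : Int) := by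
  induction D with
  | nil => intro m s _; simp
  | cons c rest ih =>
    intro m s hm
    by_cases h : m.getD c 0 > 0
    · -- match: score+1, counter decremented at c
      have hm' : ∀ k, 0 ≤ (m.modify c 0 (· - 1)).getD k 0 := by
        intro k
        rw [PySem.Dict.getD_modify]
        by_cases hk : k = c
        · simp [hk]; omega
        · simp [hk]; exact hm k
      rw [List.foldl_cons, if_pos h, ih (m.modify c 0 (· - 1)) (s + 1) hm']
      rw [List.toFinset_cons]
      by_cases hc : c ∈ rest.toFinset
      · rw [Finset.insert_eq_self.mpr hc]
        rw [← Finset.add_sum_erase _ _ hc, ← Finset.add_sum_erase _ _ hc]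
        have hterm : min ((m.modify c 0 (· - 1)).getD c 0) ((rest.count c : Int))
            = min (m.getD c 0) (((c :: rest).count c : Int)) - 1 := by
          rw [PySem.Dict.getD_modify]
          simp
          omega
        have hrest : ∀ k ∈ rest.toFinset.erase c,
            min ((m.modify c 0 (· - 1)).getD k 0) ((rest.count k : Int))
            = min (m.getD k 0) (((c :: rest).count k : Int)) := by
          intro k hk
          have hkc : k ≠ c := (Finset.mem_erase.mp hk).1
          rw [PySem.Dict.getD_modify]
          simp [hkc, Ne.symm hkc]
        rw [hterm, Finset.sum_congr rfl hrest]
        ring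
      · have hcnt : rest.count c = 0 := by
          simp [List.count_eq_zero]
          intro hmem; exact hc (List.mem_toFinset.mpr hmem)
        rw [Finset.sum_insert hc]
        have hterm : min (m.getD c 0) (((c :: rest).count c : Int)) = 1 := by
          simp [hcnt]; omega
        have hrest : ∀ k ∈ rest.toFinset,
            min ((m.modify c 0 (· - 1)).getD k 0) ((rest.count k : Int))
            = min (m.getD k 0) (((c :: rest).count k : Int)) := by
          intro k hk
          have hkc : k ≠ c := by rintro rfl; exact hc hk
          rw [PySem.Dict.getD_modify]
          simp [hkc, Ne.symm hkc]
        rw [Finset.sum_congr rfl hrest, hterm]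
        ring
    · -- no match: m.getD c 0 = 0, the c-term is 0 on both sides
      have hz : m.getD c 0 = 0 := le_antisymm (by omega) (hm c)
      rw [List.foldl_cons, if_neg h, ih m s hm]
      rw [List.toFinset_cons]
      by_cases hc : c ∈ rest.toFinset
      · rw [Finset.insert_eq_self.mpr hc]
        apply congrArg (s + ·)
        apply Finset.sum_congr rfl
        intro k hk
        by_cases hkc : k = c
        · subst hkc; simp [hz]; omega
        · simp [Ne.symm hkc]
      · rw [Finset.sum_insert hc]
        have : min (m.getD c 0) (((c :: rest).count c : Int)) = 0 := by
          simp [hz]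
          omega
        rw [this]
        have hrest : ∀ k ∈ rest.toFinset,
            min (m.getD k 0) (((c :: rest).count k : Int))
            = min (m.getD k 0) ((rest.count k : Int)) := by
          intro k hk
          have hkc : k ≠ c := by rintro rfl; exact hc hk
          simp [Ne.symm hkc]
        rw [Finset.sum_congr rfl hrest]
        ring

-- the sum over the key intersection equals the sum over D's distinct first chars
theorem pvSums (Q D : List Char) :
    ∑ c ∈ ((PySem.Set.ofList Q).inter (PySem.Set.ofList D)).toFinset,
        min ((Q.count c : Int)) ((D.count c : Int))
    = ∑ c ∈ D.toFinset, min ((Q.count c : Int)) ((D.count c : Int)) := by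
  have hmem : ∀ c, c ∈ ((PySem.Set.ofList Q).inter (PySem.Set.ofList D)).toFinset
      ↔ c ∈ Q.toFinset ∩ D.toFinset := by
    intro c
    simp [PySem.Set.mem_inter, PySem.Set.mem_ofList, List.mem_toFinset]
  have hset : ((PySem.Set.ofList Q).inter (PySem.Set.ofList D)).toFinset
      = Q.toFinset ∩ D.toFinset := Finset.ext hmem
  rw [hset]
  apply Finset.sum_subset (Finset.inter_subset_right)
  intro c hcD hc
  have hcQ : c ∉ Q.toFinset := fun hq => hc (Finset.mem_inter.mpr ⟨hq, hcD⟩)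
  have : Q.count c = 0 := by
    rw [List.count_eq_zero]
    exact fun hmem' => hcQ (List.mem_toFinset.mpr hmem')
  simp [this]

-- ===== VERDICT (by name: the statement is the Claim_ definition above) =====
theorem first_character_comparison_spec : Claim_equal_first_character_comparison := by
  intro q data _
  unfold Spec_first_character_comparison first_character_comparison first_character_comparison_alt
  simp only [pvCounterA, pvCounterB]
  set Q := pvFirsts (pvWords q)
  set D := pvFirsts (pvWords data)
  -- B side
  have hB := pvFoldWords (fun (acc : Int × PySem.Dict Char Int) (c : Char) =>
        if acc.2.getD c 0 > 0 then (acc.1 + 1, acc.2.modify c 0 (· - 1)) else acc)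
      (fun w => PySem.Str.pyGet? w 0) (pvWords data) (0, PySem.Dict.counter Q)
  rw [pvFirsts_eq] at hB
  rw [hB]
  rw [pvConsume D (PySem.Dict.counter Q) 0 (by intro c; rw [PySem.Dict.getD_counter]; positivity)]
  -- A side
  rw [PySem.List.foldl_add]
  simp only [PySem.Dict.getD_counter, PySem.Dict.keys_counter, PySem.Set.ofList_ofList]
  rw [← List.sum_toFinset _ (PySem.Set.nodup_inter _ _ (PySem.Set.nodup_ofList Q))]
  rw [pvSums Q D]
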